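-- pv_equiv track=rewrite | github.com/jinyoong/baekjoon | 2002 - 추월.py | solution
-- ===== SOURCE A (Python) =====
-- def solution(n, in_car, out_car):
--     answer = 0
--     count = 0
--
--     for j in range(n - 1, -1, -1):
--         out_car_element = out_car[j]
--
--         if j == n - 1:
--             count = in_car[out_car_element]
--             continue
--
--         if in_car[out_car_element] < count:
--             count = in_car[out_car_element]
--             continue
--
--         else:
--             answer += 1
--
--     return answer
-- ===== SOURCE B (Python) =====
-- def solution(n, in_car, out_car):
--     if n <= 0:
--         return 0
--     positions = [in_car[c] for c in out_car[:n]]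
--     answer = 0
--     while positions:
--         p = positions.pop(0)
--         if any(q <= p for q in positions):
--             answer += 1
--     return answer
-- ===== Notes on version B (the rewrite author's own statement) =====
-- stated objective: alternative
-- what changed: B replaces A's reverse running-minimum scan by a brute-force pairwise test: it materialises the positions list and, consuming it front-to-back with pop(0), counts each car that has some later-exiting car with a smaller-or-equal entry position; no minimum is maintained.
import Mathlib
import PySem

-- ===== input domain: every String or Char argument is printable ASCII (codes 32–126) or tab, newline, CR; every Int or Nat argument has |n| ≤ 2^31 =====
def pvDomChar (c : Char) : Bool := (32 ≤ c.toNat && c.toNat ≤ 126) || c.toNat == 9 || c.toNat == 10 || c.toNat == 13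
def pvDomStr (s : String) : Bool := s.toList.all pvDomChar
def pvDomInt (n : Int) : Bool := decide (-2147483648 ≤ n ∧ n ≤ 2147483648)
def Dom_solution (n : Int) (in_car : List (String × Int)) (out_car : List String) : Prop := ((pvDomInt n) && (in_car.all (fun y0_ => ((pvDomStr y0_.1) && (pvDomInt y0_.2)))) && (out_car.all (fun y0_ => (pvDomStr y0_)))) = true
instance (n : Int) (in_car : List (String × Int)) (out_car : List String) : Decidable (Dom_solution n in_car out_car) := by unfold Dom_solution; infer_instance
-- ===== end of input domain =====

-- B replaces A's reverse running-minimum scan by a brute-force pairwise test (count cars with a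
-- later-exiting car of smaller-or-equal entry position); alternative decomposition, no minimum kept.

-- ===== PORT A =====
def solution (n : Int) (in_car : List (String × Int)) (out_car : List String) : Int :=
  ((PySem.List.pyRange (n - 1) (-1) (-1)).foldl
    (fun (st : Int × Int) j =>
      let out_car_element := (PySem.List.pyGet? out_car j).getD ""
      let v := ((PySem.Dict.mk in_car).get? out_car_element).getD 0
      if j = n - 1 then (st.1, v)
      else if v < st.2 then (st.1, v)
      else (st.1 + 1, st.2))
    (0, 0)).1

-- ===== PORT B =====
-- the 'while positions: p = positions.pop(0); if any(...): answer += 1' loop of Source B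
def solutionAltLoop : List Int → Int → Int
  | [], answer => answer
  | p :: rest, answer =>
      solutionAltLoop rest (if rest.any (fun q => decide (q ≤ p)) then answer + 1 else answer)

def solution_alt (n : Int) (in_car : List (String × Int)) (out_car : List String) : Int :=
  if n ≤ 0 then 0
  else
    let positions := (PySem.List.slice out_car none (some n)).map
      (fun c => ((PySem.Dict.mk in_car).get? c).getD 0)
    solutionAltLoop positions 0

-- ===== PRECONDITION & SPEC =====
-- Pre_ excludes exactly the inputs where Python A raises: an index j < n outside out_car
-- (IndexError) or an exit name among the first n with no entry position in in_car (KeyError).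
def Pre_solution (n : Int) (in_car : List (String × Int)) (out_car : List String) : Prop :=
  0 < n → (n ≤ (out_car.length : Int) ∧
    ∀ c ∈ out_car.take n.toNat, c ∈ in_car.map Prod.fst)
instance (n : Int) (in_car : List (String × Int)) (out_car : List String) : Decidable (Pre_solution n in_car out_car) := by unfold Pre_solution; infer_instance

def pvWitness_solution : Int × (List (String × Int)) × List String :=
  (3, [("a", 0), ("b", 1), ("c", 2)], ["b", "a", "c"])

def Spec_solution (n : Int) (in_car : List (String × Int)) (out_car : List String) (out : Int) : Prop := out = solution_alt n in_car out_car
instance (n : Int) (in_car : List (String × Int)) (out_car : List String) (out : Int) : Decidable (Spec_solution n in_car out_car out) := by unfold Spec_solution; infer_instance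

-- ===== CLAIM (what is proved, stated in full; the proofs are below) =====
def Claim_equal_solution : Prop := ∀ (n : Int) (in_car : List (String × Int)) (out_car : List String), Dom_solution n in_car out_car → Pre_solution n in_car out_car → Spec_solution n in_car out_car (solution n in_car out_car)

-- ===== LEMMAS AND PROOFS =====

-- pure (non-accumulator) version of B's loop, used only by the proofs
def cntP : List Int → Int
  | [] => 0
  | p :: rest => (if rest.any (fun q => decide (q ≤ p)) then 1 else 0) + cntP rest

theorem solutionAltLoop_eq_cntP (l : List Int) (a : Int) :
    solutionAltLoop l a = a + cntP l := by
  induction l generalizing a with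
  | nil => simp [solutionAltLoop, cntP]
  | cons p rest ih =>
    by_cases h : rest.any (fun q => decide (q ≤ p))
    · simp [solutionAltLoop, cntP, h, ih]; ring
    · simp [solutionAltLoop, cntP, h, ih]

-- '∃ a later smaller-or-equal element' ↔ 'the suffix minimum is ≤ p'
theorem any_le_iff_min_le (l : List Int) (x p : Int) :
    ((l ++ [x]).any (fun q => decide (q ≤ p)) = true) ↔ l.foldr min x ≤ p := by
  induction l with
  | nil => simp
  | cons a l ih =>
    rw [List.cons_append, List.any_cons, List.foldr_cons]
    simp only [Bool.or_eq_true, decide_eq_true_eq, ih, min_le_iff]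

-- Core invariant: A's post-head step folded from the right computes (cntP of the whole
-- segment, its minimum).
theorem pv_core (l : List Int) (x : Int) :
    l.foldr (fun p (st : Int × Int) => if p < st.2 then (st.1, p) else (st.1 + 1, st.2)) (0, x)
      = (cntP (l ++ [x]), l.foldr min x) := by
  induction l with
  | nil => simp [cntP]
  | cons p l ih =>
    simp only [List.foldr_cons, ih, List.cons_append]
    by_cases h : p < l.foldr min x
    · have hany : ¬ ((l ++ [x]).any (fun q => decide (q ≤ p)) = true) := by
        rw [any_le_iff_min_le]; omega
      rw [if_pos h]
      simp [cntP, hany, min_eq_left (le_of_lt h)]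
    · have hany : ((l ++ [x]).any (fun q => decide (q ≤ p)) = true) := by
        rw [any_le_iff_min_le]; omega
      rw [if_neg h]
      rw [min_eq_right (by omega : l.foldr min x ≤ p)]
      simp only [cntP, hany, if_true, Prod.mk.injEq]
      exact ⟨by omega, trivial⟩

-- Once j = m is impossible, A's loop body folds the looked-up values w j with the pure
-- running-minimum step.
theorem pv_foldA_conv (m : Int) (w : Int → Int) (idx : List Int) (st : Int × Int)
    (h : ∀ x ∈ idx, x ≠ m) :
    idx.foldl (fun (st : Int × Int) j =>
        if j = m then (st.1, w j)
        else if w j < st.2 then (st.1, w j) else (st.1 + 1, st.2)) st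
      = (idx.map w).foldl
          (fun (st : Int × Int) p => if p < st.2 then (st.1, p) else (st.1 + 1, st.2)) st := by
  induction idx generalizing st with
  | nil => rfl
  | cons x idx ih =>
    simp only [List.foldl_cons, List.map_cons, if_neg (h x (by simp))]
    exact ih _ (fun y hy => h y (by simp [hy]))

-- A's whole loop: the first index is m (it only sets count); the rest is pv_foldA_conv.
theorem pv_foldA_run (m : Int) (w : Int → Int) (idx : List Int) (st0 : Int × Int)
    (h : ∀ x ∈ idx, x ≠ m) :
    ((m :: idx).foldl (fun (st : Int × Int) j =>
        if j = m then (st.1, w j)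
        else if w j < st.2 then (st.1, w j) else (st.1 + 1, st.2)) st0)
      = (idx.map w).foldl
          (fun (st : Int × Int) p => if p < st.2 then (st.1, p) else (st.1 + 1, st.2))
          (st0.1, w m) := by
  simp only [List.foldl_cons]
  exact pv_foldA_conv m w idx (st0.1, w m) h

theorem pv_main (n : Int) (in_car : List (String × Int)) (out_car : List String)
    (hn : 0 < n) (hlen : n ≤ (out_car.length : Int)) :
    solution n in_car out_car = solution_alt n in_car out_car := by
  have hsplit : PySem.List.pyRange 0 n 1 = PySem.List.pyRange 0 (n-1) 1 ++ [n-1] := by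
    have := PySem.List.pyRange_one_succ_right (a := 0) (b := n-1) (by omega)
    rw [show n - 1 + 1 = n by ring] at this
    exact this
  have hrange : PySem.List.pyRange (n-1) (-1) (-1) = (n-1) :: (PySem.List.pyRange 0 (n-1) 1).reverse := by
    rw [PySem.List.pyRange_neg_one_eq_reverse]
    rw [show (-1:Int)+1 = 0 from rfl, show n-1+1 = n by ring, hsplit]
    simp
  have hA : solution n in_car out_car =
      ((((PySem.List.pyRange 0 (n-1) 1).reverse).map
          (fun j => ((PySem.Dict.mk in_car).get? ((PySem.List.pyGet? out_car j).getD "")).getD 0)).foldl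
        (fun (st : Int × Int) p => if p < st.2 then (st.1, p) else (st.1 + 1, st.2))
        (0, ((PySem.Dict.mk in_car).get? ((PySem.List.pyGet? out_car (n-1)).getD "")).getD 0)).1 := by
    rw [solution, hrange]
    exact congrArg Prod.fst (pv_foldA_run (n-1) _ _ _ (by
      intro x hx
      have hm := (PySem.List.mem_pyRange_one).1 (List.mem_reverse.1 hx)
      omega))
  have htake : (PySem.List.slice out_car none (some n)).map
        (fun c => ((PySem.Dict.mk in_car).get? c).getD 0)
      = (PySem.List.pyRange 0 n 1).map
          (fun j => ((PySem.Dict.mk in_car).get? ((PySem.List.pyGet? out_car j).getD "")).getD 0) := by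
    rw [PySem.List.slice_to out_car (by omega : (0:Int) ≤ n)]
    apply List.ext_getElem
    · simp [PySem.List.length_pyRange_one]; omega
    · intro i h1 h2
      have hi : i < out_car.length := by
        simp at h1; omega
      rw [List.getElem_map, List.getElem_map, PySem.List.getElem_pyRange_one, zero_add,
        List.getElem_take, PySem.List.pyGet?_natCast, List.getElem?_eq_getElem hi]
      rfl
  have hB : solution_alt n in_car out_car =
      cntP ((((PySem.List.pyRange 0 (n-1) 1).map
          (fun j => ((PySem.Dict.mk in_car).get? ((PySem.List.pyGet? out_car j).getD "")).getD 0)))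
        ++ [((PySem.Dict.mk in_car).get? ((PySem.List.pyGet? out_car (n-1)).getD "")).getD 0]) := by
    rw [solution_alt, if_neg (by omega)]
    show solutionAltLoop _ 0 = _
    rw [htake, hsplit, List.map_append, solutionAltLoop_eq_cntP]
    simp
  rw [hA, hB]
  rw [List.map_reverse, List.foldl_reverse, pv_core]

-- ===== VERDICT (by name: the statement is the Claim_ definition above) =====
theorem solution_spec : Claim_equal_solution := by
  intro n in_car out_car _hdom hpre
  unfold Spec_solution
  by_cases hn : n ≤ 0
  · rw [solution, PySem.List.pyRange_neg_one_eq_nil (by omega : n - 1 ≤ -1),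
      solution_alt, if_pos hn]
    rfl
  · exact pv_main n in_car out_car (by omega) ((hpre (by omega)).1)
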